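-- pv_equiv track=rewrite | github.com/pfl-cs/ALECE | src/utils/sql_utils.py | remove_extra_blanks
-- ===== SOURCE A (Python) =====
-- def remove_extra_blanks(sql):
--     sql = sql.replace('\t', ' ').lower()
--     while True:
--         l = len(sql)
--         sql = sql.replace('  ', ' ')
--         if l == len(sql):
--             break
--     s = 'select count(*) from'
--     # sql[0:len(s)] = s
--     sql = s + sql[len(s):]
--     sql = sql.replace(' :: timestamp', '::timestamp')
--     return sql
-- ===== SOURCE B (Python) =====
-- def remove_extra_blanks(sql):
--     sql = sql.replace('\t', ' ').lower()
--     out = []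
--     for ch in sql:
--         if ch != ' ' or not out or out[-1] != ' ':
--             out.append(ch)
--     sql = ''.join(out)
--     s = 'select count(*) from'
--     sql = s + sql[len(s):]
--     return sql.replace(' :: timestamp', '::timestamp')
-- ===== Notes on version B (the rewrite author's own statement) =====
-- stated objective: alternative
-- what changed: A reaches the collapsed string by a fixpoint while-loop of repeated whole-string double-space replacements; B builds it in one left-to-right pass that skips a space whenever the previously kept character is a space.
import Mathlib
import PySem

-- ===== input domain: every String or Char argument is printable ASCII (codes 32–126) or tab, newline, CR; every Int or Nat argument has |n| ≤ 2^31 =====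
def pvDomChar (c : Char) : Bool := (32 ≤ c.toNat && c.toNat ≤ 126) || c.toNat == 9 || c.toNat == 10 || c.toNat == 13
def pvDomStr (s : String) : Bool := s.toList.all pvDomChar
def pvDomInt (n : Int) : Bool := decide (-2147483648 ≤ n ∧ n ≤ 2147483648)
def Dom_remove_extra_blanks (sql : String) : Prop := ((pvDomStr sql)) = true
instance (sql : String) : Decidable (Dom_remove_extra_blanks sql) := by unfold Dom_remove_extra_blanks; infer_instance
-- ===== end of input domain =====

-- B replaces A's fixpoint while-loop of repeated double-space replacement by one
-- left-to-right pass that skips a space whenever the previously kept character is a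
-- space (same output; objective: alternative single-pass formulation).

-- ===== PORT A =====

-- one pass of sql.replace('  ', ' '), written structurally (used to prove the
-- termination of A's while-loop; `replace_eq_pvRep1` connects it to PySem.Chars.replace)
def pvRep1 : List Char → List Char
  | [] => []
  | [c] => [c]
  | c₁ :: c₂ :: t =>
    if c₁ = ' ' ∧ c₂ = ' ' then ' ' :: pvRep1 t else c₁ :: pvRep1 (c₂ :: t)

theorem pvRep1_length_le (l : List Char) : (pvRep1 l).length ≤ l.length := by
  induction l using pvRep1.induct with
  | case1 => simp [pvRep1]
  | case2 c => simp [pvRep1]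
  | case3 c₁ c₂ t h ih =>
    obtain ⟨h1, h2⟩ := h; subst h1; subst h2
    rw [pvRep1, if_pos ⟨rfl, rfl⟩]
    simp; omega
  | case4 c₁ c₂ t h ih =>
    rw [pvRep1, if_neg h]
    simp at ih ⊢; omega

theorem pvGo_eq (fuel : Nat) : ∀ (l acc : List Char), l.length ≤ fuel →
    PySem.Chars.replace.go [' ', ' '] [' '] fuel l acc = acc.reverse ++ pvRep1 l := by
  induction fuel with
  | zero =>
    intro l acc h
    have : l = [] := List.eq_nil_of_length_eq_zero (Nat.le_zero.mp h)
    subst this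
    simp [PySem.Chars.replace.go, pvRep1]
  | succ n ih =>
    intro l acc h
    match l with
    | [] => simp [PySem.Chars.replace.go, pvRep1]
    | [c] =>
      rw [PySem.Chars.replace.go]
      have hpre : [' ', ' '].isPrefixOf [c] = false := by
        simp [List.isPrefixOf]
      rw [if_neg (by simp [hpre])]
      rw [ih [] (c :: acc) (by simp)]
      simp [pvRep1]
    | c₁ :: c₂ :: t =>
      rw [PySem.Chars.replace.go]
      by_cases hsp : c₁ = ' ' ∧ c₂ = ' '
      · obtain ⟨h1, h2⟩ := hsp
        subst h1; subst h2
        have hpre : [' ', ' '].isPrefixOf (' ' :: ' ' :: t) = true := by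
          simp [List.isPrefixOf]
        rw [if_pos hpre]
        have hdrop : List.drop [' ', ' '].length (' ' :: ' ' :: t) = t := rfl
        rw [hdrop, ih t ([' '].reverse ++ acc) (by simp at h ⊢; omega)]
        rw [pvRep1, if_pos ⟨rfl, rfl⟩]
        simp
      · have hpre : ¬ ([' ', ' '].isPrefixOf (c₁ :: c₂ :: t) = true) := by
          simp [List.isPrefixOf]
          intro h1 h2
          exact hsp ⟨h1.symm, h2.symm⟩
        rw [if_neg hpre]
        rw [ih (c₂ :: t) (c₁ :: acc) (by simp at h ⊢; omega)]
        rw [pvRep1, if_neg hsp]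
        simp

theorem replace_eq_pvRep1 (l : List Char) :
    PySem.Chars.replace l [' ', ' '] [' '] = pvRep1 l := by
  rw [PySem.Chars.replace]
  simp only [List.isEmpty, Bool.false_eq_true, if_false]
  exact pvGo_eq l.length l [] le_rfl

-- A's `while True: sql = sql.replace('  ', ' '); stop when the length is unchanged`
def pvLoopA (l : List Char) : List Char :=
  let len := l.length
  let l' := PySem.Chars.replace l [' ', ' '] [' ']
  if len = l'.length then l' else pvLoopA l'
termination_by l.length
decreasing_by
  rename_i hne
  have h1 := replace_eq_pvRep1 l
  have h2 := pvRep1_length_le l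
  simp only [len, l', h1] at hne ⊢
  omega

def pvCoreA (l : List Char) : List Char :=
  let l := PySem.Chars.lower (PySem.Chars.replace l ['\t'] [' '])
  let l := pvLoopA l
  let s := "select count(*) from".toList
  let l := s ++ PySem.Chars.slice l (some (s.length : Int)) none
  PySem.Chars.replace l (" :: timestamp".toList) ("::timestamp".toList)

def remove_extra_blanks (sql : String) : String :=
  String.ofList (pvCoreA sql.toList)

-- ===== PORT B =====

def pvCoreB (l : List Char) : List Char :=
  let l := PySem.Chars.lower (PySem.Chars.replace l ['\t'] [' '])
  let out := l.foldl
    (fun acc c => if c ≠ ' ' ∨ acc = [] ∨ acc.getLast? ≠ some ' ' then acc ++ [c] else acc)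
    ([] : List Char)
  let s := "select count(*) from".toList
  let l := s ++ PySem.Chars.slice out (some (s.length : Int)) none
  PySem.Chars.replace l (" :: timestamp".toList) ("::timestamp".toList)

def remove_extra_blanks_alt (sql : String) : String :=
  String.ofList (pvCoreB sql.toList)

-- ===== PRECONDITION & SPEC =====
def Spec_remove_extra_blanks (sql : String) (out : String) : Prop := out = remove_extra_blanks_alt sql
instance (sql : String) (out : String) : Decidable (Spec_remove_extra_blanks sql out) := by unfold Spec_remove_extra_blanks; infer_instance

-- ===== CLAIM (what is proved, stated in full; the proofs are below) =====
def Claim_equal_remove_extra_blanks : Prop := ∀ (sql : String), Dom_remove_extra_blanks sql → Spec_remove_extra_blanks sql (remove_extra_blanks sql)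

-- ===== LEMMAS AND PROOFS =====

-- the squeezed tail, parameterised by the last kept character
def pvSq : Option Char → List Char → List Char
  | _, [] => []
  | h, c :: t => if c = ' ' ∧ h = some ' ' then pvSq h t else c :: pvSq (some c) t

theorem pvSq_rep1 (l : List Char) : ∀ h, pvSq h (pvRep1 l) = pvSq h l := by
  induction l using pvRep1.induct with
  | case1 => intro h; simp [pvRep1]
  | case2 c => intro h; simp [pvRep1]
  | case3 c₁ c₂ t hc ih =>
    intro h
    obtain ⟨h1, h2⟩ := hc; subst h1; subst h2
    rw [pvRep1, if_pos ⟨rfl, rfl⟩]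
    by_cases hh : h = some ' '
    · subst hh
      simp [pvSq, ih]
    · simp [pvSq, hh, ih]
  | case4 c₁ c₂ t hc ih =>
    intro h
    rw [pvRep1, if_neg hc]
    by_cases hcond : c₁ = ' ' ∧ h = some ' '
    · rw [pvSq, if_pos hcond, pvSq, if_pos hcond]
      exact ih h
    · rw [pvSq, if_neg hcond, pvSq, if_neg hcond]
      rw [ih (some c₁)]

theorem pvRep1_fix (l : List Char) : (pvRep1 l).length = l.length → pvRep1 l = l := by
  induction l using pvRep1.induct with
  | case1 => intro _; rfl
  | case2 c => intro _; rfl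
  | case3 c₁ c₂ t hc ih =>
    intro hlen
    obtain ⟨h1, h2⟩ := hc; subst h1; subst h2
    rw [pvRep1, if_pos ⟨rfl, rfl⟩] at hlen
    have := pvRep1_length_le t
    simp at hlen; omega
  | case4 c₁ c₂ t hc ih =>
    intro hlen
    simp only [pvRep1, if_neg hc] at hlen ⊢
    simp at hlen
    rw [ih hlen]

theorem pvSq_of_fix (l : List Char) (hfix : pvRep1 l = l) :
    ∀ h, (h = some ' ' → l.head? ≠ some ' ') → pvSq h l = l := by
  induction l using pvRep1.induct with
  | case1 => intro h _; rfl
  | case2 c =>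
    intro h hh
    rw [pvSq]
    rw [if_neg]
    · rfl
    · rintro ⟨h1, h2⟩
      exact (hh h2) (by simp [h1])
  | case3 c₁ c₂ t hc ih =>
    exfalso
    obtain ⟨h1, h2⟩ := hc; subst h1; subst h2
    rw [pvRep1, if_pos ⟨rfl, rfl⟩] at hfix
    have h2 := congrArg List.length hfix
    have := pvRep1_length_le t
    simp at h2; omega
  | case4 c₁ c₂ t hc ih =>
    intro h hh
    simp only [pvRep1, if_neg hc] at hfix
    have htail : pvRep1 (c₂ :: t) = c₂ :: t := by
      exact (List.cons.injEq _ _ _ _ ▸ hfix).2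
    rw [pvSq]
    rw [if_neg]
    · rw [ih htail (some c₁) ?_]
      intro hcsp
      simp at hcsp
      intro hhd
      simp at hhd
      exact hc ⟨hcsp, hhd⟩
    · rintro ⟨h1, h2⟩
      exact (hh h2) (by simp [h1])

theorem pvLoopA_eq_pvSq (n : Nat) : ∀ l : List Char, l.length ≤ n → pvLoopA l = pvSq none l := by
  induction n with
  | zero =>
    intro l h
    have : l = [] := List.eq_nil_of_length_eq_zero (Nat.le_zero.mp h)
    subst this
    rw [pvLoopA]
    simp [replace_eq_pvRep1, pvRep1, pvSq]
  | succ n ih =>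
    intro l h
    rw [pvLoopA]
    simp only [replace_eq_pvRep1]
    by_cases hlen : l.length = (pvRep1 l).length
    · rw [if_pos hlen]
      have hfix := pvRep1_fix l hlen.symm
      rw [hfix]
      exact (pvSq_of_fix l hfix none (by simp)).symm
    · rw [if_neg hlen]
      have hle := pvRep1_length_le l
      have : (pvRep1 l).length ≤ n := by omega
      rw [ih (pvRep1 l) this]
      exact pvSq_rep1 l none

theorem pvFoldl_eq_pvSq (l : List Char) : ∀ acc : List Char,
    l.foldl (fun acc c => if c ≠ ' ' ∨ acc = [] ∨ acc.getLast? ≠ some ' ' then acc ++ [c] else acc) acc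
      = acc ++ pvSq acc.getLast? l := by
  induction l with
  | nil => intro acc; simp [pvSq]
  | cons c t ih =>
    intro acc
    simp only [List.foldl]
    by_cases hcond : c = ' ' ∧ acc.getLast? = some ' '
    · have hne : acc ≠ [] := by
        intro ha; rw [ha] at hcond; simp at hcond
      rw [if_neg (by simp [hcond.1, hcond.2, hne])]
      rw [ih acc]
      rw [pvSq, if_pos hcond]
    · rw [if_pos ?_]
      · rw [ih (acc ++ [c])]
        rw [pvSq, if_neg hcond]
        simp
      · by_cases h1 : c = ' '
        · subst h1
          right
          rcases Decidable.em (acc = []) with h2 | h2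
          · exact Or.inl h2
          · right
            intro hl
            exact hcond ⟨rfl, hl⟩
        · exact Or.inl h1

theorem pvCoreA_eq_pvCoreB (l : List Char) : pvCoreA l = pvCoreB l := by
  simp only [pvCoreA, pvCoreB]
  rw [pvLoopA_eq_pvSq (PySem.Chars.lower (PySem.Chars.replace l ['\t'] [' '])).length _ le_rfl]
  rw [pvFoldl_eq_pvSq _ []]
  simp

-- ===== VERDICT (by name: the statement is the Claim_ definition above) =====
theorem remove_extra_blanks_spec : Claim_equal_remove_extra_blanks := by
  intro sql _
  unfold Spec_remove_extra_blanks remove_extra_blanks remove_extra_blanks_alt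
  rw [pvCoreA_eq_pvCoreB]
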